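-- pv_equiv track=rewrite | github.com/daniter-cu/pytorch-pretrained-BERT | examples/parse_questions.py | order_chunks
-- ===== SOURCE A (Python) =====
-- def order_chunks(chunks, parse):
--     chunks_cp = list(chunks)
--     questions = []
--     other = []
--     for chunk in chunks_cp:
--         tokens, (span, part) = chunk
--         if part.strip("[]").startswith("W"):
--             questions.append(chunk)
--         else:
--             other.append(chunk)
--     questions.sort(key=lambda x: len(x[0]), reverse=True)
--     other.sort(key=lambda x: len(x[0]), reverse=True)
--     return other + questions
-- ===== SOURCE B (Python) =====
-- def order_chunks(chunks, parse):
--     # one stable sort with a composite key: non-question group first (False < True),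
--     # then descending token count; stability preserves original order on ties.
--     return sorted(chunks, key=lambda x: (x[1][1].strip("[]").startswith("W"), -len(x[0])))
-- ===== Notes on version B (the rewrite author's own statement) =====
-- stated objective: simpler
-- what changed: Replaced the explicit partition loop plus two reverse sorts and a concatenation with a single stable sort over all chunks using the composite key (is-question group, -token-count).
import Mathlib
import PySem

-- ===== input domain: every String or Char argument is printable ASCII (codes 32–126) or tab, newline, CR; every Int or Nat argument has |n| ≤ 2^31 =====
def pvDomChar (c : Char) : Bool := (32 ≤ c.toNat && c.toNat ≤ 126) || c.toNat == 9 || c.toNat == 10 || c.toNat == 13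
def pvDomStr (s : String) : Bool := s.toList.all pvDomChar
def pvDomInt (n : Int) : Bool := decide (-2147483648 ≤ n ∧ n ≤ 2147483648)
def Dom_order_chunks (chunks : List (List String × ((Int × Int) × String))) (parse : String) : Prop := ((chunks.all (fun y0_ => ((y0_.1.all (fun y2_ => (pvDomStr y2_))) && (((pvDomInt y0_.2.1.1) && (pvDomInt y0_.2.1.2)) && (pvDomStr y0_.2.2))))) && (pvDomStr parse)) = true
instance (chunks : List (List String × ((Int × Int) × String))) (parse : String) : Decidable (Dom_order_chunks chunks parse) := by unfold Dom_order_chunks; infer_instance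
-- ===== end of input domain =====

-- B replaces A's partition-and-two-reverse-sorts by a single stable sort with the
-- composite key (is-question group, -token-count); objective: simpler.


-- shared helper: part.strip("[]").startswith("W") (exact via PySem.Str)
def pvIsQ (x : List String × ((Int × Int) × String)) : Bool :=
  PySem.Str.startswith (PySem.Str.stripChars x.2.2 "[]") "W"

-- ===== PORT A =====
-- the loop appending to `questions`/`other`, then each list sorted by len(x[0]) descending
def order_chunks (chunks : List (List String × ((Int × Int) × String))) (parse : String) : List (List String × ((Int × Int) × String)) :=
  let qo := chunks.foldl
    (fun acc chunk => if pvIsQ chunk then (acc.1 ++ [chunk], acc.2) else (acc.1, acc.2 ++ [chunk]))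
    ([], [])
  PySem.List.sorted qo.2 (fun x => (x.1.length : Int)) true ++
    PySem.List.sorted qo.1 (fun x => (x.1.length : Int)) true

-- ===== PORT B =====
-- sorted(chunks, key=lambda x: (x[1][1].strip("[]").startswith("W"), -len(x[0])))
def order_chunks_alt (chunks : List (List String × ((Int × Int) × String))) (parse : String) : List (List String × ((Int × Int) × String)) :=
  PySem.List.sorted2 chunks (fun x => pvIsQ x) (fun x => -(x.1.length : Int)) false

-- ===== PRECONDITION & SPEC =====
def Spec_order_chunks (chunks : List (List String × ((Int × Int) × String))) (parse : String) (out : List (List String × ((Int × Int) × String))) : Prop := out = order_chunks_alt chunks parse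
instance (chunks : List (List String × ((Int × Int) × String))) (parse : String) (out : List (List String × ((Int × Int) × String))) : Decidable (Spec_order_chunks chunks parse out) := by unfold Spec_order_chunks; infer_instance

-- ===== CLAIM (what is proved, stated in full; the proofs are below) =====
def Claim_equal_order_chunks : Prop := ∀ (chunks : List (List String × ((Int × Int) × String))) (parse : String), Dom_order_chunks chunks parse → Spec_order_chunks chunks parse (order_chunks chunks parse)

-- ===== LEMMAS AND PROOFS =====

-- x passes over a prefix none of whose elements it goes before
theorem pv_insertBy_append_not {α : Type} (b : α → α → Bool) (x : α) (O Q : List α)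
    (h : ∀ y ∈ O, b x y = false) :
    PySem.List.insertBy b x (O ++ Q) = O ++ PySem.List.insertBy b x Q := by
  induction O with
  | nil => simp
  | cons o os ih =>
    have hb : b x o = false := h o (by simp)
    simp [PySem.List.insertBy, hb, ih (fun y hy => h y (by simp [hy]))]

-- x stops before a suffix all of whose elements it goes before
theorem pv_insertBy_append_all {α : Type} (b : α → α → Bool) (x : α) (O Q : List α)
    (h : ∀ y ∈ Q, b x y = true) :
    PySem.List.insertBy b x (O ++ Q) = PySem.List.insertBy b x O ++ Q := by
  induction O with
  | nil =>
    cases Q with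
    | nil => simp
    | cons q qs => simp [PySem.List.insertBy, h q (by simp)]
  | cons o os ih =>
    by_cases hb : b x o = true
    · simp [PySem.List.insertBy, hb]
    · simp only [Bool.not_eq_true] at hb
      simp [PySem.List.insertBy, hb, ih]

-- insertBy only looks at the comparison against list members
theorem pv_insertBy_congr {α : Type} (b1 b2 : α → α → Bool) (x : α) (ys : List α)
    (h : ∀ y ∈ ys, b1 x y = b2 x y) :
    PySem.List.insertBy b1 x ys = PySem.List.insertBy b2 x ys := by
  induction ys with
  | nil => rfl
  | cons y t ih =>
    have hy : b1 x y = b2 x y := h y (by simp)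
    simp only [PySem.List.insertBy, hy]
    by_cases hb : b2 x y = true
    · simp [hb]
    · simp only [Bool.not_eq_true] at hb
      simp [hb, ih (fun z hz => h z (by simp [hz]))]

-- the composite-key stable sort equals (non-questions sorted desc) ++ (questions sorted desc)
theorem pv_main {α : Type} (p : α → Bool) (k : α → Int) (xs : List α) :
    PySem.List.sorted2 xs (fun x => p x) (fun x => -(k x)) false =
      PySem.List.sorted (xs.filter (fun x => !p x)) k true ++
        PySem.List.sorted (xs.filter p) k true := by
  induction xs using List.reverseRecOn with
  | nil => rfl
  | append_singleton xs x ih =>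
    have hmemO : ∀ y ∈ PySem.List.sorted (xs.filter (fun x => !p x)) k true, p y = false := by
      intro y hy
      have := (PySem.List.mem_sorted (xs := xs.filter (fun x => !p x))
        (key := k) (rev := true) (x := y)).mp hy
      simpa using (List.of_mem_filter this)
    have hmemQ : ∀ y ∈ PySem.List.sorted (xs.filter p) k true, p y = true := by
      intro y hy
      have := (PySem.List.mem_sorted (xs := xs.filter p)
        (key := k) (rev := true) (x := y)).mp hy
      exact List.of_mem_filter this
    -- unfold both sides to their foldl/insertBy form over the snoc
    rw [PySem.List.sorted2] at ih ⊢
    simp only [List.foldl_append, List.foldl_cons, List.foldl_nil, ih]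
    by_cases hp : p x = true
    · -- question chunk: passes all non-questions, then inserted by descending length
      rw [pv_insertBy_append_not _ _ _ _ (by
        intro y hy
        have hpy := hmemO y hy
        simp [hp, hpy]),
        pv_insertBy_congr _ (fun a b => decide (k b < k a)) _ _ (by
          intro y hy
          have hpy := hmemQ y hy
          simp [hp, hpy])]
      simp [hp, List.filter_append, PySem.List.sorted_rev_eq_foldl_insertBy]
    · simp only [Bool.not_eq_true] at hp
      -- non-question chunk: goes before every question, inserted among non-questions
      rw [pv_insertBy_append_all _ _ _ _ (by
        intro y hy
        have hpy := hmemQ y hy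
        simp [hp, hpy]),
        pv_insertBy_congr _ (fun a b => decide (k b < k a)) _ _ (by
          intro y hy
          have hpy := hmemO y hy
          simp [hp, hpy])]
      simp [hp, List.filter_append, PySem.List.sorted_rev_eq_foldl_insertBy]

-- A's accumulator loop is a partition into (questions, other) = (filter pvIsQ, filter (!pvIsQ))
theorem pv_partition (xs : List (List String × ((Int × Int) × String)))
    (q o : List (List String × ((Int × Int) × String))) :
    xs.foldl
      (fun acc chunk => if pvIsQ chunk then (acc.1 ++ [chunk], acc.2) else (acc.1, acc.2 ++ [chunk]))
      (q, o) = (q ++ xs.filter pvIsQ, o ++ xs.filter (fun x => !pvIsQ x)) := by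
  induction xs generalizing q o with
  | nil => simp
  | cons x t ih =>
    by_cases hp : pvIsQ x = true
    · simp [hp, ih]
    · simp only [Bool.not_eq_true] at hp
      simp [hp, ih]

-- ===== VERDICT (by name: the statement is the Claim_ definition above) =====
theorem order_chunks_spec : Claim_equal_order_chunks := by
  intro chunks parse _
  show order_chunks chunks parse = order_chunks_alt chunks parse
  rw [order_chunks, order_chunks_alt, pv_partition, pv_main pvIsQ (fun x => (x.1.length : Int))]
  simp
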